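-- pv_equiv track=rewrite | github.com/Thompson-cyber/NEP_Builder | scripts/phase1_stats.py | distribution_buckets
-- ===== SOURCE A (Python) =====
-- def distribution_buckets(values, buckets):
--     """将数值列表按 buckets 边界分桶，返回各桶计数"""
--     result = {}
--     edges = list(buckets)
--     for i, edge in enumerate(edges):
--         lo = edges[i - 1] if i > 0 else float('-inf')
--         hi = edge
--         label = f"<={hi}" if i == 0 else f"{lo+1}~{hi}"
--         result[label] = sum(1 for v in values if lo < v <= hi)
--     result[f">{edges[-1]}"] = sum(1 for v in values if v > edges[-1])
--     return result
-- ===== SOURCE B (Python) =====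
-- def distribution_buckets(values, buckets):
--     """将数值列表按 buckets 边界分桶，返回各桶计数"""
--     sv = sorted(values)
--     n = len(sv)
--
--     def count_le(x):
--         # number of sorted values <= x, by binary search
--         lo, hi = 0, n
--         while lo < hi:
--             mid = (lo + hi) // 2
--             if sv[mid] <= x:
--                 lo = mid + 1
--             else:
--                 hi = mid
--         return lo
--
--     result = {}
--     for i, edge in enumerate(buckets):
--         if i == 0:
--             result[f"<={edge}"] = count_le(edge)
--         else:
--             prev = buckets[i - 1]
--             d = count_le(edge) - count_le(prev)
--             result[f"{prev + 1}~{edge}"] = d if d > 0 else 0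
--     last = buckets[-1]
--     result[f">{last}"] = n - count_le(last)
--     return result
-- ===== Notes on version B (the rewrite author's own statement) =====
-- stated objective: faster
-- what changed: B sorts the values once and computes each bucket's count as a difference of prefix counts obtained by a hand-rolled binary search (count_le(edge) - count_le(prev), clamped at 0), instead of rescanning the whole value list for every bucket.
import Mathlib
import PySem

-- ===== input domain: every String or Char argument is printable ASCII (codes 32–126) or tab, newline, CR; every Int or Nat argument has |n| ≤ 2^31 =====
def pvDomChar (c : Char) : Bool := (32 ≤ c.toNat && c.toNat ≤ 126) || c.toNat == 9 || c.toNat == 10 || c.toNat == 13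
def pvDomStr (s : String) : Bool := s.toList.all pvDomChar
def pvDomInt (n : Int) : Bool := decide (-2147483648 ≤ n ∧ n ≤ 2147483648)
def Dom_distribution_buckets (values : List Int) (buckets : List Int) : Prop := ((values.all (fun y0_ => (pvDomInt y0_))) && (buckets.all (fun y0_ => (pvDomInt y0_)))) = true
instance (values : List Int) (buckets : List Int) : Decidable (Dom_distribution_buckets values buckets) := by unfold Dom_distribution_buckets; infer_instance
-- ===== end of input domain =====

-- B sorts the values once and binary-searches each bucket edge (prefix counts) instead of
-- rescanning all values for every bucket (objective: faster).

-- ===== PORT A =====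
def distribution_buckets (values : List Int) (buckets : List Int) : List (String × Int) :=
  let edges := buckets
  let result : PySem.Dict String Int :=
    (PySem.List.enumerate edges).foldl
      (fun r ie =>
        let i := ie.1
        let edge := ie.2
        -- edges[i-1] is only evaluated when 0 < i < len(edges), so it is in range: pyGetD's default is never used
        let lo : Option Int := if i > 0 then some (PySem.List.pyGetD edges ((i : Int) - 1) 0) else none
        let hi := edge
        let label : String :=
          if i == 0 then "<=" ++ PySem.Int.toStr hi
          else PySem.Int.toStr (lo.getD 0 + 1) ++ "~" ++ PySem.Int.toStr hi
        let cnt : Int := values.foldl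
          (fun acc v =>
            if (match lo with | none => true | some l => decide (l < v)) && decide (v ≤ hi)
            then acc + 1 else acc) 0
        r.insert label cnt)
      PySem.Dict.empty
  -- edges[-1] raises IndexError iff buckets = [], which Pre_ excludes: the default is never used
  let last := PySem.List.pyGetD edges (-1) 0
  (result.insert (">" ++ PySem.Int.toStr last)
    (values.foldl (fun acc v => if last < v then acc + 1 else acc) 0)).items

-- ===== PORT B =====
-- count_le's hand-written binary-search loop; sv[mid] is always in range here (lo ≤ mid < hi ≤ len sv)
def pvCountLeAux (sv : List Int) (x : Int) (lo hi : Nat) : Nat :=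
  if _h : lo < hi then
    if PySem.List.pyGetD sv (((lo + hi) / 2 : Nat) : Int) 0 ≤ x then
      pvCountLeAux sv x ((lo + hi) / 2 + 1) hi
    else
      pvCountLeAux sv x lo ((lo + hi) / 2)
  else lo
termination_by hi - lo
decreasing_by all_goals omega

def pvCountLe (sv : List Int) (x : Int) : Nat := pvCountLeAux sv x 0 sv.length

def distribution_buckets_alt (values : List Int) (buckets : List Int) : List (String × Int) :=
  let sv := PySem.List.sorted values (fun v => v) false
  let n := sv.length
  let result : PySem.Dict String Int :=
    (PySem.List.enumerate buckets).foldl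
      (fun r ie =>
        let i := ie.1
        let edge := ie.2
        if i == 0 then
          r.insert ("<=" ++ PySem.Int.toStr edge) ((pvCountLe sv edge : Int))
        else
          -- buckets[i-1] is in range here (0 < i < len(buckets))
          let prev := PySem.List.pyGetD buckets ((i : Int) - 1) 0
          let d : Int := (pvCountLe sv edge : Int) - (pvCountLe sv prev : Int)
          r.insert (PySem.Int.toStr (prev + 1) ++ "~" ++ PySem.Int.toStr edge)
            (if d > 0 then d else 0))
      PySem.Dict.empty
  -- buckets[-1] raises IndexError iff buckets = [] (excluded by Pre_)
  let last := PySem.List.pyGetD buckets (-1) 0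
  (result.insert (">" ++ PySem.Int.toStr last) ((n : Int) - (pvCountLe sv last : Int))).items

-- ===== PRECONDITION & SPEC =====
-- A evaluates edges[-1], which raises IndexError iff buckets is empty; nothing else raises.
def Pre_distribution_buckets (values : List Int) (buckets : List Int) : Prop := buckets ≠ []
instance (values : List Int) (buckets : List Int) : Decidable (Pre_distribution_buckets values buckets) := by unfold Pre_distribution_buckets; infer_instance

def pvWitness_distribution_buckets : List Int × List Int := ([0, 3, -2, 5], [1, 4])

def Spec_distribution_buckets (values : List Int) (buckets : List Int) (out : List (String × Int)) : Prop := out = distribution_buckets_alt values buckets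
instance (values : List Int) (buckets : List Int) (out : List (String × Int)) : Decidable (Spec_distribution_buckets values buckets out) := by unfold Spec_distribution_buckets; infer_instance

-- ===== CLAIM (what is proved, stated in full; the proofs are below) =====
def Claim_equal_distribution_buckets : Prop := ∀ (values : List Int) (buckets : List Int), Dom_distribution_buckets values buckets → Pre_distribution_buckets values buckets → Spec_distribution_buckets values buckets (distribution_buckets values buckets)

-- ===== LEMMAS AND PROOFS =====

-- If the first m sorted entries are ≤ x and the rest are > x, the (≤ x)-count is m.
lemma pvCountP_eq_of_bounds (sv : List Int) (x : Int) (m : Nat) (hm : m ≤ sv.length)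
    (h1 : ∀ j, j < m → sv.getD j 0 ≤ x)
    (h2 : ∀ j, m ≤ j → j < sv.length → x < sv.getD j 0) :
    sv.countP (fun v => decide (v ≤ x)) = m := by
  conv_lhs => rw [← List.take_append_drop m sv]
  rw [List.countP_append]
  have ht : (sv.take m).countP (fun v => decide (v ≤ x)) = m := by
    have hall : ∀ a ∈ sv.take m, (fun v => decide (v ≤ x)) a = true := by
      intro a ha
      obtain ⟨j, hj, rfl⟩ := List.mem_iff_getElem.mp ha
      have hjm : j < m := by
        have := hj; simp [List.length_take] at this; omega
      have hjl : j < sv.length := by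
        have := hj; simp [List.length_take] at this; omega
      have : (sv.take m)[j] = sv[j] := List.getElem_take
      rw [this]
      have := h1 j hjm
      rw [List.getD_eq_getElem sv 0 hjl] at this
      simpa using this
    rw [List.countP_eq_length.mpr hall, List.length_take]
    omega
  have hd : (sv.drop m).countP (fun v => decide (v ≤ x)) = 0 := by
    rw [List.countP_eq_zero]
    intro a ha
    obtain ⟨j, hj, rfl⟩ := List.mem_iff_getElem.mp ha
    have hjl : m + j < sv.length := by
      have := hj; simp [List.length_drop] at this; omega
    have : (sv.drop m)[j] = sv[m + j] := by
      rw [List.getElem_drop]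
    rw [this]
    have := h2 (m + j) (by omega) hjl
    rw [List.getD_eq_getElem sv 0 hjl] at this
    simp
    omega
  omega

-- The binary-search loop computes the (≤ x)-count on a monotone list.
lemma pvCountLeAux_correct (sv : List Int) (x : Int)
    (hmono : ∀ p q : Nat, p ≤ q → q < sv.length → sv.getD p 0 ≤ sv.getD q 0) :
    ∀ (k lo hi : Nat), hi - lo ≤ k → lo ≤ hi → hi ≤ sv.length →
      (∀ j, j < lo → sv.getD j 0 ≤ x) →
      (∀ j, hi ≤ j → j < sv.length → x < sv.getD j 0) →
      pvCountLeAux sv x lo hi = sv.countP (fun v => decide (v ≤ x)) := by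
  intro k
  induction k with
  | zero =>
    intro lo hi hk hle hlen h1 h2
    have heq : lo = hi := by omega
    subst heq
    rw [pvCountLeAux, dif_neg (lt_irrefl lo)]
    exact (pvCountP_eq_of_bounds sv x lo hlen h1 h2).symm
  | succ k ih =>
    intro lo hi hk hle hlen h1 h2
    by_cases h : lo < hi
    · rw [pvCountLeAux, dif_pos h]
      have hmidlt : (lo + hi) / 2 < hi := by omega
      have hmidge : lo ≤ (lo + hi) / 2 := by omega
      have hmlen : (lo + hi) / 2 < sv.length := by omega
      have hget : PySem.List.pyGetD sv (((lo + hi) / 2 : Nat) : Int) 0 = sv.getD ((lo + hi) / 2) 0 := by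
        rw [PySem.List.pyGetD_eq_getElem sv 0 (by omega) (by exact_mod_cast hmlen)]
        rw [List.getD_eq_getElem sv 0 (by simpa using hmlen)]
        congr 1
      by_cases hc : sv.getD ((lo + hi) / 2) 0 ≤ x
      · rw [if_pos (by rw [hget]; exact hc)]
        refine ih ((lo + hi) / 2 + 1) hi (by omega) (by omega) hlen ?_ h2
        intro j hj
        exact le_trans (hmono j ((lo + hi) / 2) (by omega) hmlen) hc
      · rw [if_neg (by rw [hget]; exact hc)]
        refine ih lo ((lo + hi) / 2) (by omega) (by omega) (by omega) h1 ?_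
        intro j hj hjl
        exact lt_of_lt_of_le (lt_of_not_ge hc) (hmono ((lo + hi) / 2) j hj hjl)
    · have heq : lo = hi := by omega
      subst heq
      rw [pvCountLeAux, dif_neg (lt_irrefl lo)]
      exact (pvCountP_eq_of_bounds sv x lo hlen h1 h2).symm

lemma pvCountLe_correct (values : List Int) (x : Int) :
    pvCountLe (PySem.List.sorted values (fun v => v) false) x
      = values.countP (fun v => decide (v ≤ x)) := by
  have hmono : ∀ p q : Nat, p ≤ q →
      q < (PySem.List.sorted values (fun v => v) false).length →
      (PySem.List.sorted values (fun v => v) false).getD p 0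
        ≤ (PySem.List.sorted values (fun v => v) false).getD q 0 := by
    intro p q hpq hq
    rw [List.getD_eq_getElem _ 0 (by omega), List.getD_eq_getElem _ 0 hq]
    exact PySem.List.sorted_id_getElem_mono values hpq hq
  rw [pvCountLe,
    pvCountLeAux_correct _ x hmono (PySem.List.sorted values (fun v => v) false).length 0 _
      (by omega) (by omega) le_rfl (fun j hj => absurd hj (Nat.not_lt_zero j))
      (fun j hj hjl => absurd hjl (by omega))]
  exact (PySem.List.sorted_perm values (fun v => v) false).countP_eq _

lemma pvCountP_between (values : List Int) (l h : Int) (hlh : l ≤ h) :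
    values.countP (fun v => decide (v ≤ h)) =
      values.countP (fun v => decide (v ≤ l))
        + values.countP (fun v => decide (l < v ∧ v ≤ h)) := by
  induction values with
  | nil => simp
  | cons a t iht =>
    simp only [List.countP_cons]
    by_cases h1 : a ≤ l
    · have h2 : a ≤ h := le_trans h1 hlh
      have h3 : ¬ l < a := not_lt.mpr h1
      simp [h1, h2, h3, iht]
      omega
    · have h3 : l < a := not_le.mp h1
      by_cases h2 : a ≤ h
      · simp [h1, h2, h3, iht]
        omega
      · simp [h1, h2, h3, iht]

lemma pvCount_between_eq (values : List Int) (l h : Int) :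
    (values.countP (fun v => decide (l < v ∧ v ≤ h)) : Int) =
      (if ((values.countP (fun v => decide (v ≤ h)) : Int)
            - (values.countP (fun v => decide (v ≤ l)) : Int)) > 0
       then (values.countP (fun v => decide (v ≤ h)) : Int)
            - (values.countP (fun v => decide (v ≤ l)) : Int)
       else 0) := by
  by_cases hlh : l ≤ h
  · have hsplit := pvCountP_between values l h hlh
    split_ifs with hd <;> omega
  · have h3 : h < l := not_le.mp hlh
    have hzero : values.countP (fun v => decide (l < v ∧ v ≤ h)) = 0 := by
      rw [List.countP_eq_zero]
      intro a _
      simp only [decide_eq_true_eq]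
      omega
    have hmon : values.countP (fun v => decide (v ≤ h)) ≤ values.countP (fun v => decide (v ≤ l)) := by
      apply List.countP_mono_left
      intro a _ hc
      simp only [decide_eq_true_eq] at hc ⊢
      omega
    split_ifs with hd <;> omega

lemma pvCountGt_eq (values : List Int) (last : Int) :
    (values.countP (fun v => decide (last < v)) : Int)
      = (values.length : Int) - (values.countP (fun v => decide (v ≤ last)) : Int) := by
  have h := List.length_eq_countP_add_countP (l := values) (p := fun v => decide (v ≤ last))
  have h2 : values.countP (fun a => decide ¬((fun v => decide (v ≤ last)) a = true))
      = values.countP (fun v => decide (last < v)) := by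
    apply List.countP_congr
    intro a _
    simp only [decide_eq_true_eq]
    constructor <;> (intro hx; simp at hx ⊢; omega)
  rw [h2] at h
  omega

-- ===== VERDICT (by name: the statement is the Claim_ definition above) =====
theorem distribution_buckets_spec : Claim_equal_distribution_buckets := by
  intro values buckets _ _
  show distribution_buckets values buckets = distribution_buckets_alt values buckets
  simp only [distribution_buckets, distribution_buckets_alt]
  have hcl : ∀ x : Int,
      ((pvCountLe (PySem.List.sorted values (fun v => v) false) x : Int))
        = (values.countP (fun v => decide (v ≤ x)) : Int) := by
    intro x; exact_mod_cast congrArg Nat.cast (pvCountLe_correct values x)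
  refine congrArg PySem.Dict.items (congrArg₂ (fun (d : PySem.Dict String Int) (c : Int) =>
      d.insert (">" ++ PySem.Int.toStr (PySem.List.pyGetD buckets (-1) 0)) c) ?_ ?_)
  · apply PySem.List.foldl_congr_mem
    intro r ie hmem
    have h0 : 0 ≤ ie.1 := by
      obtain ⟨k, hk, rfl⟩ := (PySem.List.mem_enumerate_iff buckets 0 ie).mp hmem
      simp
    by_cases hI : ie.1 = 0
    · simp [hI]
      rw [PySem.List.foldl_ite_add_one, zero_add, ← hcl ie.2]
    · have hpos : 0 < ie.1 := by omega
      simp [hI, hpos]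
      rw [PySem.List.foldl_ite_add_one, zero_add, pvCount_between_eq,
        ← hcl ie.2, ← hcl (PySem.List.pyGetD buckets ((ie.1 : Int) - 1) 0)]
      simp [Int.sub_pos]
  · rw [PySem.List.foldl_ite_add_one, zero_add, pvCountGt_eq,
      ← hcl (PySem.List.pyGetD buckets (-1) 0)]
    congr 1
    exact_mod_cast
      (congrArg Nat.cast ((PySem.List.sorted_perm values (fun v => v) false).length_eq)).symm
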